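-- pv_equiv track=rewrite | github.com/Ok3ks/Microsoft_sentence_completion | BERT_lm.py | make_segment_ids
-- ===== SOURCE A (Python) =====
-- def make_segment_ids(list_of_tokens):
--     #this function assumes that up to and including the first '[SEP]' is the first segment, anything afterwards is the second segment
--     current_id=0
--     segment_ids=[]
--     for token in list_of_tokens:
--         segment_ids.append(current_id)
--         if token == '[SEP]':
--             current_id +=1
--     return segment_ids
-- ===== SOURCE B (Python) =====
-- from itertools import accumulate
--
-- def make_segment_ids(list_of_tokens):
--     flags = [1 if t == '[SEP]' else 0 for t in list_of_tokens]
--     return list(accumulate([0] + flags))[:-1]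
-- ===== Notes on version B (the rewrite author's own statement) =====
-- stated objective: idiomatic
-- what changed: Replaces the append-then-increment loop by a two-stage decomposition: mark [SEP] positions with a 0/1 indicator list, then take exclusive prefix sums via itertools.accumulate.
import Mathlib
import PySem

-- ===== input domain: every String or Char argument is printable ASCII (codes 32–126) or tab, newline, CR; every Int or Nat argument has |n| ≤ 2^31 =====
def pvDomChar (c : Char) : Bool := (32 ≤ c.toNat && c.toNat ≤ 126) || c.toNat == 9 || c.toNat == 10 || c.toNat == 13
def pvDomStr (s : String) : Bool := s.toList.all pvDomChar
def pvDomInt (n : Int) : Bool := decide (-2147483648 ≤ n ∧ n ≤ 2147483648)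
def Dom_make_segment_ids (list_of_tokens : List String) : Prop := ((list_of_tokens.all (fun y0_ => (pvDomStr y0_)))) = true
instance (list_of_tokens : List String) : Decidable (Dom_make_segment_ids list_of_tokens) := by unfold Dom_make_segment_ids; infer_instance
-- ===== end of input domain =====

-- B replaces A's append-then-increment loop by an idiomatic decomposition: 0/1 [SEP] indicators, then exclusive prefix sums (same cost).


-- ===== PORT A =====
-- Port of A: fold carrying (current_id, segment_ids), appending then bumping on '[SEP]'.
def make_segment_ids (list_of_tokens : List String) : List Int :=
  (list_of_tokens.foldl
    (fun (st : Int × List Int) token =>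
      let segs := st.2 ++ [st.1]
      (if token == "[SEP]" then st.1 + 1 else st.1, segs))
    (0, [])).2

-- ===== PORT B =====
-- Port of B: 0/1 SEP indicators, then exclusive prefix sums (accumulate([0]+flags))[:-1].
def pvAccum (s : Int) : List Int → List Int
  | [] => [s]
  | x :: xs => s :: pvAccum (s + x) xs

def make_segment_ids_alt (list_of_tokens : List String) : List Int :=
  let flags := list_of_tokens.map (fun t => if t == "[SEP]" then (1 : Int) else 0)
  (pvAccum 0 flags).dropLast

-- ===== PRECONDITION & SPEC =====
def Spec_make_segment_ids (list_of_tokens : List String) (out : List Int) : Prop := out = make_segment_ids_alt list_of_tokens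
instance (list_of_tokens : List String) (out : List Int) : Decidable (Spec_make_segment_ids list_of_tokens out) := by unfold Spec_make_segment_ids; infer_instance

-- ===== CLAIM (what is proved, stated in full; the proofs are below) =====
def Claim_equal_make_segment_ids : Prop := ∀ (list_of_tokens : List String), Dom_make_segment_ids list_of_tokens → Spec_make_segment_ids list_of_tokens (make_segment_ids list_of_tokens)

-- ===== LEMMAS AND PROOFS =====

-- ===== VERDICT (by name: the statement is the Claim_ definition above) =====
lemma pvAccum_ne_nil (s : Int) (l : List Int) : pvAccum s l ≠ [] := by
  cases l <;> simp [pvAccum]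

lemma pv_loop (l : List String) (c : Int) (acc : List Int) :
    (l.foldl
      (fun (st : Int × List Int) token =>
        let segs := st.2 ++ [st.1]
        (if token == "[SEP]" then st.1 + 1 else st.1, segs))
      (c, acc)).2
    = acc ++ (pvAccum c (l.map (fun t => if t == "[SEP]" then (1 : Int) else 0))).dropLast := by
  induction l generalizing c acc with
  | nil => simp [pvAccum]
  | cons t ts ih =>
    simp only [List.foldl_cons, List.map_cons, pvAccum]
    rw [List.dropLast_cons_of_ne_nil (pvAccum_ne_nil _ _), ih]
    by_cases h : t == "[SEP]" <;> simp [h]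

theorem make_segment_ids_spec : Claim_equal_make_segment_ids := by
  intro l _
  unfold Spec_make_segment_ids make_segment_ids make_segment_ids_alt
  simpa using pv_loop l 0 []
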